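-- pv_equiv track=rewrite | github.com/olinox14/pypog | pypog/geometry.py | fhex_pivot
-- ===== SOURCE A (Python) =====
-- def fhex_pivot(center, coordinates, rotations):
--     """pivot 'rotations' times the coordinates (list of (x, y) tuples)
--     around the center coordinates (x,y)
--     On hexagonal grid, rotates of 60 degrees each time"""
--     if coordinates == [center] or rotations % 6 == 0:
--         return coordinates
--     x0, y0 = center
--     xu0, yu0, zu0 = cv_off_cube(x0, y0)
--     result = []
--
--     for x, y in coordinates:
--         xu, yu, zu = cv_off_cube(x, y)
--         dxu, dyu, dzu = xu - xu0, yu - yu0, zu - zu0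
--         for _ in range(rotations):
--             dxu, dyu, dzu = -dzu, -dxu, -dyu
--         xru, yru, zru = dxu + xu0, dyu + yu0, dzu + zu0
--         xr, yr = cv_cube_off(xru, yru, zru)
--         result.append((xr, yr))
--     return result
--
-- def cv_cube_off(xu, yu, zu):
--     """convert cubic coordinates (xu, yu, zu) in standards coordinates (x, y) [offset]"""
--     y = int(xu + (zu - (zu & 1)) / 2)
--     x = zu
--     return (x, y)
--
-- def cv_off_cube(x, y):
--     """converts standards coordinates (x, y) [offset] in cubic coordinates (xu, yu, zu)"""
--     zu = x
--     xu = int(y - (x - (x & 1)) / 2)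
--     yu = int(-xu - zu)
--     return (xu, yu, zu)
-- ===== SOURCE B (Python) =====
-- # Same results as the original, but the per-point 60-degree rotation loop is replaced
-- # by a single table lookup of rotations % 6 (0 when rotations <= 0, as range() iterates
-- # zero times then), and the early-return guard becomes unnecessary.
--
-- def cv_cube_off(xu, yu, zu):
--     y = int(xu + (zu - (zu & 1)) / 2)
--     x = zu
--     return (x, y)
--
-- def cv_off_cube(x, y):
--     zu = x
--     xu = int(y - (x - (x & 1)) / 2)
--     yu = int(-xu - zu)
--     return (xu, yu, zu)
--
-- def _rot60(r, a, b, c):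
--     if r == 1: return (-c, -a, -b)
--     if r == 2: return (b, c, a)
--     if r == 3: return (-a, -b, -c)
--     if r == 4: return (c, a, b)
--     if r == 5: return (-b, -c, -a)
--     return (a, b, c)
--
-- def fhex_pivot(center, coordinates, rotations):
--     r = rotations % 6 if rotations > 0 else 0
--     xu0, yu0, zu0 = cv_off_cube(center[0], center[1])
--     result = []
--     for x, y in coordinates:
--         xu, yu, zu = cv_off_cube(x, y)
--         a, b, c = _rot60(r, xu - xu0, yu - yu0, zu - zu0)
--         result.append(cv_cube_off(a + xu0, b + yu0, c + zu0))
--     return result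
-- ===== Notes on version B (the rewrite author's own statement) =====
-- stated objective: faster
-- what changed: The per-point inner loop that applies the 60-degree cube-coordinate rotation `rotations` times is replaced by a single six-entry table lookup of rotations % 6 (0 when rotations <= 0, since range() then iterates zero times), which also makes A's early-return guard unnecessary.
import Mathlib
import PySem

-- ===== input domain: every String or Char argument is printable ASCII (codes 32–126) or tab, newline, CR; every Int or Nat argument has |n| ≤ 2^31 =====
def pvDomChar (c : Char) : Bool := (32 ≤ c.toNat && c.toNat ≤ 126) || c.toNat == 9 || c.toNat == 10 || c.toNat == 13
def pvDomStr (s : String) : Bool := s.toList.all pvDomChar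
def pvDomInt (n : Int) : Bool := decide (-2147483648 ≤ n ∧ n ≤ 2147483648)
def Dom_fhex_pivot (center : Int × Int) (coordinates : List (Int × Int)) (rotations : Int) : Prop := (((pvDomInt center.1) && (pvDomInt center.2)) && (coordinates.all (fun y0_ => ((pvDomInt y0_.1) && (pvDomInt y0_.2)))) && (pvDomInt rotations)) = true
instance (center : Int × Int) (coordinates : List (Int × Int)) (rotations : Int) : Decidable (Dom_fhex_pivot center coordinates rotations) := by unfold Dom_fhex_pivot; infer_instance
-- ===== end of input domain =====

-- B replaces A's per-point `for _ in range(rotations)` inner loop by a single six-entry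
-- table lookup of rotations % 6 (0 when rotations <= 0, as range() then iterates zero
-- times), dropping the early-return guard; objective: faster per point when rotations is large.

-- ===== PORT A =====
-- int((t - (t & 1)) / 2): the numerator is even, so Python's float division is exact on the
-- stated domain (|values| ≪ 2^53) and int() is the exact quotient = floor division.
def cvOffCube (x y : Int) : Int × Int × Int :=
  let zu := x
  let xu := y - PySem.Int.floordiv (x - PySem.Int.band x 1) 2
  let yu := -xu - zu
  (xu, yu, zu)

def cvCubeOff (xu _yu zu : Int) : Int × Int :=
  let y := xu + PySem.Int.floordiv (zu - PySem.Int.band zu 1) 2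
  let x := zu
  (x, y)

def fhex_pivot (center : Int × Int) (coordinates : List (Int × Int)) (rotations : Int) : List (Int × Int) :=
  if coordinates = [center] ∨ PySem.Int.mod rotations 6 = 0 then coordinates
  else
    let c0 := cvOffCube center.1 center.2
    coordinates.foldl (fun result p =>
      let c := cvOffCube p.1 p.2
      let d0 := (c.1 - c0.1, c.2.1 - c0.2.1, c.2.2 - c0.2.2)
      let d := (PySem.List.pyRange 0 rotations 1).foldl
                 (fun (d : Int × Int × Int) _ => (-d.2.2, -d.1, -d.2.1)) d0
      result ++ [cvCubeOff (d.1 + c0.1) (d.2.1 + c0.2.1) (d.2.2 + c0.2.2)]) []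

-- ===== PORT B =====
def rot60 (r : Int) (a b c : Int) : Int × Int × Int :=
  if r = 1 then (-c, -a, -b)
  else if r = 2 then (b, c, a)
  else if r = 3 then (-a, -b, -c)
  else if r = 4 then (c, a, b)
  else if r = 5 then (-b, -c, -a)
  else (a, b, c)

def fhex_pivot_alt (center : Int × Int) (coordinates : List (Int × Int)) (rotations : Int) : List (Int × Int) :=
  let r := if rotations > 0 then PySem.Int.mod rotations 6 else 0
  let c0 := cvOffCube center.1 center.2
  coordinates.map (fun p =>
    let c := cvOffCube p.1 p.2
    let d := rot60 r (c.1 - c0.1) (c.2.1 - c0.2.1) (c.2.2 - c0.2.2)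
    cvCubeOff (d.1 + c0.1) (d.2.1 + c0.2.1) (d.2.2 + c0.2.2))

-- ===== PRECONDITION & SPEC =====
def Spec_fhex_pivot (center : Int × Int) (coordinates : List (Int × Int)) (rotations : Int) (out : List (Int × Int)) : Prop := out = fhex_pivot_alt center coordinates rotations
instance (center : Int × Int) (coordinates : List (Int × Int)) (rotations : Int) (out : List (Int × Int)) : Decidable (Spec_fhex_pivot center coordinates rotations out) := by unfold Spec_fhex_pivot; infer_instance

-- ===== CLAIM (what is proved, stated in full; the proofs are below) =====
def Claim_equal_fhex_pivot : Prop := ∀ (center : Int × Int) (coordinates : List (Int × Int)) (rotations : Int), Dom_fhex_pivot center coordinates rotations → Spec_fhex_pivot center coordinates rotations (fhex_pivot center coordinates rotations)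

-- ===== LEMMAS AND PROOFS =====

-- B's per-element computation, named for the proofs
def pivotOne (c0 : Int × Int × Int) (r : Int) (p : Int × Int) : Int × Int :=
  let c := cvOffCube p.1 p.2
  let d := rot60 r (c.1 - c0.1) (c.2.1 - c0.2.1) (c.2.2 - c0.2.2)
  cvCubeOff (d.1 + c0.1) (d.2.1 + c0.2.1) (d.2.2 + c0.2.2)

theorem alt_eq_map (center : Int × Int) (coordinates : List (Int × Int)) (rotations : Int) :
    fhex_pivot_alt center coordinates rotations
      = coordinates.map (pivotOne (cvOffCube center.1 center.2)
          (if rotations > 0 then PySem.Int.mod rotations 6 else 0)) := rfl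

-- the one-step 60-degree rotation of A's inner loop
def rotStep (d : Int × Int × Int) : Int × Int × Int := (-d.2.2, -d.1, -d.2.1)

theorem foldl_const_iterate (l : List Int) (d : Int × Int × Int) :
    l.foldl (fun d _ => rotStep d) d = rotStep^[l.length] d := by
  induction l generalizing d with
  | nil => rfl
  | cons x xs ih => simp [List.foldl, ih, Function.iterate_succ_apply]

theorem rotStep_rot60 (k : Nat) (a b c : Int) (hk : k < 6) :
    rotStep (rot60 (k : Int) a b c) = rot60 (((k + 1) % 6 : Nat) : Int) a b c := by
  interval_cases k <;> simp [rot60, rotStep]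

theorem iterate_rot60 (n : Nat) (a b c : Int) :
    rotStep^[n] (a, b, c) = rot60 ((n % 6 : Nat) : Int) a b c := by
  induction n with
  | zero => simp [rot60]
  | succ n ih =>
      rw [Function.iterate_succ_apply', ih,
        rotStep_rot60 (n % 6) a b c (Nat.mod_lt _ (by omega))]
      congr 2
      omega

theorem roundtrip (x y : Int) :
    cvCubeOff (cvOffCube x y).1 (cvOffCube x y).2.1 (cvOffCube x y).2.2 = (x, y) := by
  simp [cvOffCube, cvCubeOff]

theorem rot60_zero_delta (r : Int) : rot60 r 0 0 0 = (0, 0, 0) := by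
  unfold rot60; split_ifs <;> rfl

theorem pivotOne_zero (c0x c0y : Int) (p : Int × Int) :
    pivotOne (cvOffCube c0x c0y) 0 p = p := by
  have h := roundtrip p.1 p.2
  simp only [pivotOne, rot60, if_neg (by norm_num : ¬(0:Int) = 1),
    if_neg (by norm_num : ¬(0:Int) = 2), if_neg (by norm_num : ¬(0:Int) = 3),
    if_neg (by norm_num : ¬(0:Int) = 4), if_neg (by norm_num : ¬(0:Int) = 5)]
  simpa using h

theorem pivotOne_center (center : Int × Int) (r : Int) :
    pivotOne (cvOffCube center.1 center.2) r center = center := by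
  simp only [pivotOne, sub_self, rot60_zero_delta, zero_add]
  simpa using roundtrip center.1 center.2

-- A's inner loop equals B's table lookup, for every sign of rotations
theorem loop_eq_table (rotations a b c : Int) :
    (PySem.List.pyRange 0 rotations 1).foldl
        (fun (d : Int × Int × Int) _ => (-d.2.2, -d.1, -d.2.1)) (a, b, c)
      = rot60 (if rotations > 0 then PySem.Int.mod rotations 6 else 0) a b c := by
  have hstep : (fun (d : Int × Int × Int) (_ : Int) => (-d.2.2, -d.1, -d.2.1))
      = fun d _ => rotStep d := rfl
  rw [hstep, foldl_const_iterate, PySem.List.length_pyRange_one]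
  by_cases hpos : rotations > 0
  · have hmod : PySem.Int.mod rotations 6 = ((rotations.toNat % 6 : Nat) : Int) := by
      rw [PySem.Int.mod_eq_emod_of_pos (by omega)]
      omega
    simp only [if_pos hpos, hmod, Int.sub_zero]
    exact iterate_rot60 rotations.toNat a b c
  · have h0 : (rotations - 0).toNat = 0 := by omega
    rw [h0, if_neg hpos]
    exact iterate_rot60 0 a b c

-- ===== VERDICT (by name: the statement is the Claim_ definition above) =====
theorem fhex_pivot_spec : Claim_equal_fhex_pivot := by
  intro center coordinates rotations _
  show fhex_pivot center coordinates rotations = fhex_pivot_alt center coordinates rotations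
  rw [alt_eq_map]
  unfold fhex_pivot
  by_cases hguard : coordinates = [center] ∨ PySem.Int.mod rotations 6 = 0
  · rw [if_pos hguard]
    rcases hguard with hc | hmod
    · subst hc
      rw [List.map_singleton, pivotOne_center]
    · have hr : (if rotations > 0 then PySem.Int.mod rotations 6 else 0) = 0 := by
        split_ifs
        · exact hmod
        · rfl
      rw [hr]
      have hf : pivotOne (cvOffCube center.1 center.2) 0 = id :=
        funext (pivotOne_zero center.1 center.2)
      rw [hf, List.map_id]
  · rw [if_neg hguard, PySem.List.foldl_append_singleton_eq_map]
    apply List.map_congr_left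
    intro p _
    simp only [loop_eq_table]
    rfl
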